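-- pv_equiv track=rewrite | github.com/gbox3d/visionFlow | src/visionflow/sample/camera/build_camera_map.py | split_by_continuous_indices
-- ===== SOURCE A (Python) =====
-- from typing import Dict, List, Tuple
--
-- def split_by_continuous_indices(indices: List[int]) -> List[List[int]]:
--     if not indices:
--         return []
--
--     indices = sorted(indices)
--     groups: List[List[int]] = []
--     current = [indices[0]]
--
--     for prev, cur in zip(indices, indices[1:]):
--         if cur == prev + 1:
--             current.append(cur)
--         else:
--             groups.append(current)
--             current = [cur]
--
--     groups.append(current)
--     return groups
-- ===== SOURCE B (Python) =====
-- def split_by_continuous_indices(indices):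
--     s = sorted(indices)
--     n = len(s)
--     out = []
--     i = 0
--     while i < n:
--         j = i + 1
--         while j < n and s[j] == s[j - 1] + 1:
--             j += 1
--         out.append(s[i:j])
--         i = j
--     return out
-- ===== Notes on version B (the rewrite author's own statement) =====
-- stated objective: alternative
-- what changed: Replaces A's fold over zip(s, s[1:]) carrying a groups/current accumulator (with a trailing flush) by a two-pointer scan: an inner loop advances j to the end of the current consecutive run and each group is taken as the slice s[i:j], so no run accumulator or final append exists.
import Mathlib
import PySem

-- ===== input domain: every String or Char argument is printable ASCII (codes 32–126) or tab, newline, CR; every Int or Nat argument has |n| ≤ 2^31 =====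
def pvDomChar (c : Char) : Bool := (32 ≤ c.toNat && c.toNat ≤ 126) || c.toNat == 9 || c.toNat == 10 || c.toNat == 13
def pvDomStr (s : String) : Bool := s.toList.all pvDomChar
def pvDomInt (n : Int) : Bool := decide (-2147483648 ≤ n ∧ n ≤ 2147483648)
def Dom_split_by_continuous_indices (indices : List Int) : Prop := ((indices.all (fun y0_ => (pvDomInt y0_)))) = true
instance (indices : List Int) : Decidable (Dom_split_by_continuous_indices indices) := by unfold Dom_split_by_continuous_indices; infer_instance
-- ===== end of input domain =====

-- B replaces A's accumulator fold over zip(s, s[1:]) by a two-pointer scan taking each group as a slice s[i:j]; same cost, return value proved equal.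

-- ===== PORT A =====
-- literal port of A: guard, sort, then a fold over zip(s, s[1:]) carrying (groups, current), with a final append of current
def split_by_continuous_indices (indices : List Int) : List (List Int) :=
  if indices = [] then []
  else
    let s := PySem.List.sorted indices (fun x => x) false
    match s with
    | [] => []
    | h :: t =>
      let st := (List.zip s t).foldl
        (fun (st : List (List Int) × List Int) pc =>
          if pc.2 = pc.1 + 1 then (st.1, st.2 ++ [pc.2]) else (st.1 ++ [st.2], [pc.2]))
        ([], [h])
      st.1 ++ [st.2]

-- ===== PORT B =====
-- inner while loop of Source B: advance j while j < n and s[j] == s[j-1] + 1.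
-- The comparison is ported through pyGet? (Option equality); this is exact here because whenever
-- Python evaluates it we have 1 <= j < n, so both accesses are in range and return some value.
def pvInnerB (s : List Int) (n j : Int) : Int :=
  if h : j < n ∧ PySem.List.pyGet? s j = (PySem.List.pyGet? s (j - 1)).map (· + 1) then
    pvInnerB s n (j + 1)
  else j
termination_by (n - j).toNat
decreasing_by omega

-- j never moves backwards (cited by pvOuterB's decreasing_by)
theorem le_pvInnerB (s : List Int) (n : Int) : ∀ (k : Nat) (j : Int), (n - j).toNat ≤ k → j ≤ pvInnerB s n j := by
  intro k
  induction k with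
  | zero =>
      intro j hk
      rw [pvInnerB]
      split
      · omega
      · omega
  | succ k ih =>
      intro j hk
      rw [pvInnerB]
      split
      · exact le_trans (by omega) (ih (j + 1) (by omega))
      · omega

-- outer while loop of Source B: peel the slice s[i:j] of each maximal run, advancing i to j
def pvOuterB (s : List Int) (n i : Int) (out : List (List Int)) : List (List Int) :=
  if _hi : i < n then
    let j := pvInnerB s n (i + 1)
    pvOuterB s n j (out ++ [PySem.List.slice s (some i) (some j)])
  else out
termination_by (n - i).toNat
decreasing_by
  have := le_pvInnerB s n (n - (i + 1)).toNat (i + 1) (le_refl _)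
  omega

def split_by_continuous_indices_alt (indices : List Int) : List (List Int) :=
  let s := PySem.List.sorted indices (fun x => x) false
  let n : Int := s.length
  pvOuterB s n 0 []

-- ===== PRECONDITION & SPEC =====
def Spec_split_by_continuous_indices (indices : List Int) (out : List (List Int)) : Prop := out = split_by_continuous_indices_alt indices
instance (indices : List Int) (out : List (List Int)) : Decidable (Spec_split_by_continuous_indices indices out) := by unfold Spec_split_by_continuous_indices; infer_instance

-- ===== CLAIM (what is proved, stated in full; the proofs are below) =====
def Claim_equal_split_by_continuous_indices : Prop := ∀ (indices : List Int), Dom_split_by_continuous_indices indices → Spec_split_by_continuous_indices indices (split_by_continuous_indices indices)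

-- ===== LEMMAS AND PROOFS =====

-- proof-side intermediary: recursive run-peeling (both ports are proved equal to pvGo of the sorted list)
def pvTakeRun (prev : Int) : List Int → List Int × List Int
  | [] => ([], [])
  | x :: xs =>
      if x = prev + 1 then
        let r := pvTakeRun x xs
        (x :: r.1, r.2)
      else ([], x :: xs)

theorem pvTakeRun_rest_le (prev : Int) (xs : List Int) : (pvTakeRun prev xs).2.length ≤ xs.length := by
  induction xs generalizing prev with
  | nil => simp [pvTakeRun]
  | cons x xs ih =>
      simp only [pvTakeRun]
      split
      · exact le_trans (ih x) (Nat.le_succ _)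
      · simp

theorem pvTakeRun_append (prev : Int) (xs : List Int) : (pvTakeRun prev xs).1 ++ (pvTakeRun prev xs).2 = xs := by
  induction xs generalizing prev with
  | nil => simp [pvTakeRun]
  | cons x xs ih =>
      simp only [pvTakeRun]
      split
      · simp [ih x]
      · simp

def pvGo : List Int → List (List Int)
  | [] => []
  | x :: xs =>
      let r := pvTakeRun x xs
      (x :: r.1) :: pvGo r.2
termination_by xs => xs.length
decreasing_by
  simp only [List.length_cons]
  exact Nat.lt_succ_of_le (pvTakeRun_rest_le x xs)

-- abstract form of A's loop body state transformer, unrolled over the tail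
def pvGo2 (c : List Int) (x : Int) : List Int → List (List Int)
  | [] => [c]
  | y :: t => if y = x + 1 then pvGo2 (c ++ [y]) y t else c :: pvGo2 [y] y t

theorem foldl_eq_go2 (t : List Int) : ∀ (x : Int) (g : List (List Int)) (c : List Int),
    (List.foldl (fun (st : List (List Int) × List Int) pc =>
        if pc.2 = pc.1 + 1 then (st.1, st.2 ++ [pc.2]) else (st.1 ++ [st.2], [pc.2]))
      (g, c) ((x :: t).zip t)).1
    ++ [(List.foldl (fun (st : List (List Int) × List Int) pc =>
        if pc.2 = pc.1 + 1 then (st.1, st.2 ++ [pc.2]) else (st.1 ++ [st.2], [pc.2]))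
      (g, c) ((x :: t).zip t)).2] = g ++ pvGo2 c x t := by
  induction t with
  | nil => intro x g c; simp [pvGo2]
  | cons y t ih =>
      intro x g c
      by_cases h : y = x + 1
      · subst h
        simpa [pvGo2] using ih (x + 1) g (c ++ [x + 1])
      · simpa [pvGo2, h] using ih y (g ++ [c]) [y]

theorem go2_eq_go (t : List Int) : ∀ (x : Int) (c : List Int),
    pvGo2 c x t = (c ++ (pvTakeRun x t).1) :: pvGo (pvTakeRun x t).2 := by
  induction t with
  | nil => intro x c; simp [pvGo2, pvTakeRun, pvGo]
  | cons y t ih =>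
      intro x c
      by_cases h : y = x + 1
      · subst h
        simp only [pvGo2, pvTakeRun]
        rw [ih (x + 1) (c ++ [x + 1])]
        simp
      · simp only [pvGo2, pvTakeRun, if_neg h]
        rw [ih y [y]]
        simp [pvGo]

-- the inner loop computes j + length of the run continuing prev = s[j-1]
theorem innerB_spec (s : List Int) : ∀ (k : Nat) (j prev : Int), 1 ≤ j → s.length - j.toNat ≤ k →
    s.drop (j - 1).toNat = prev :: s.drop j.toNat →
    pvInnerB s (s.length : Int) j = j + ((pvTakeRun prev (s.drop j.toNat)).1.length : Int) := by
  intro k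
  induction k with
  | zero =>
      intro j prev hj hk hdrop
      have hjlen : s.length ≤ j.toNat := by omega
      have hnil : s.drop j.toNat = [] := List.drop_eq_nil_of_le hjlen
      rw [pvInnerB, dif_neg (by omega)]
      simp [hnil, pvTakeRun]
  | succ k ih =>
      intro j prev hj hk hdrop
      by_cases hjn : j.toNat < s.length
      · have hx : s.drop j.toNat = s[j.toNat] :: s.drop (j.toNat + 1) := List.drop_eq_getElem_cons hjn
        set x := s[j.toNat] with hxdef
        have hget_j : PySem.List.pyGet? s j = some x :=
          PySem.List.pyGet?_eq_some_getElem s (by omega) (by omega)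
        have hj1 : (j - 1).toNat < s.length := by omega
        have hx1 : s.drop (j - 1).toNat = s[(j - 1).toNat] :: s.drop ((j - 1).toNat + 1) :=
          List.drop_eq_getElem_cons hj1
        have hprev : s[(j - 1).toNat] = prev := by
          rw [hx1] at hdrop
          exact (List.cons.injEq _ _ _ _ ▸ hdrop).1
        have hget_j1 : PySem.List.pyGet? s (j - 1) = some prev := by
          rw [PySem.List.pyGet?_eq_some_getElem s (by omega) (by omega), hprev]
        have hnext : (j + 1 - 1).toNat = j.toNat := by omega
        have htn : (j + 1).toNat = j.toNat + 1 := by omega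
        by_cases hcons : x = prev + 1
        · rw [pvInnerB, dif_pos ⟨by push_cast; omega, by rw [hget_j, hget_j1]; simp [hcons]⟩]
          rw [ih (j + 1) x (by omega) (by omega) (by rw [hnext, htn, hx])]
          rw [hx, htn]
          simp only [pvTakeRun, if_pos hcons, List.length_cons]
          push_cast
          ring
        · rw [pvInnerB, dif_neg (by
            intro hcond
            rw [hget_j, hget_j1] at hcond
            simp at hcond
            exact hcons hcond.2)]
          rw [hx]
          simp [pvTakeRun, hcons]
      · have hnil : s.drop j.toNat = [] := List.drop_eq_nil_of_le (by omega)
        rw [pvInnerB, dif_neg (by omega)]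
        simp [hnil, pvTakeRun]

-- the outer loop equals run-peeling on the remaining suffix
theorem outerB_spec (s : List Int) : ∀ (k : Nat) (i : Int) (out : List (List Int)), 0 ≤ i →
    s.length - i.toNat ≤ k →
    pvOuterB s (s.length : Int) i out = out ++ pvGo (s.drop i.toNat) := by
  intro k
  induction k with
  | zero =>
      intro i out hi hk
      rw [pvOuterB, dif_neg (by omega)]
      rw [List.drop_eq_nil_of_le (by omega)]
      simp [pvGo]
  | succ k ih =>
      intro i out hi hk
      by_cases hin : i.toNat < s.length
      · have hx : s.drop i.toNat = s[i.toNat] :: s.drop (i.toNat + 1) := List.drop_eq_getElem_cons hin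
        set x := s[i.toNat] with hxdef
        have hti : (i + 1).toNat = i.toNat + 1 := by omega
        have hinner : pvInnerB s (s.length : Int) (i + 1)
            = i + 1 + ((pvTakeRun x (s.drop (i.toNat + 1))).1.length : Int) := by
          have hI := innerB_spec s (s.length - (i + 1).toNat) (i + 1) x (by omega) (le_refl _)
            (by rw [show (i + 1 - 1).toNat = i.toNat by omega, hti, hx])
          rw [hti] at hI
          exact hI
        set r := pvTakeRun x (s.drop (i.toNat + 1)) with hrdef
        rw [pvOuterB, dif_pos (by omega)]
        simp only [hinner]
        have hj0 : (0 : Int) ≤ i + 1 + (r.1.length : Int) := by omega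
        have hslice : PySem.List.slice s (some i) (some (i + 1 + (r.1.length : Int))) = x :: r.1 := by
          rw [PySem.List.slice_toNat s (by omega) hj0]
          rw [hx, show (i + 1 + (r.1.length : Int)).toNat - i.toNat = 1 + r.1.length by omega]
          rw [List.take_add, List.take_one]
          have hsplit : s.drop (i.toNat + 1) = r.1 ++ r.2 := by
            rw [hrdef]
            exact (pvTakeRun_append x _).symm
          simp [hsplit, List.take_left']
        rw [hslice]
        have hrest : s.drop (i + 1 + (r.1.length : Int)).toNat = r.2 := by
          have hsplit : s.drop (i.toNat + 1) = r.1 ++ r.2 := by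
            rw [hrdef]
            exact (pvTakeRun_append x _).symm
          rw [show (i + 1 + (r.1.length : Int)).toNat = (i.toNat + 1) + r.1.length by omega]
          rw [← List.drop_drop, hsplit]
          simp
        have hlen2 : r.2.length ≤ s.length - (i.toNat + 1) := by
          have := pvTakeRun_rest_le x (s.drop (i.toNat + 1))
          rw [← hrdef] at this
          calc r.2.length ≤ (s.drop (i.toNat + 1)).length := this
            _ = s.length - (i.toNat + 1) := by rw [List.length_drop]
        rw [ih (i + 1 + (r.1.length : Int)) (out ++ [x :: r.1]) (by omega) (by
          rw [show (i + 1 + (r.1.length : Int)).toNat = (i.toNat + 1) + r.1.length by omega]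
          have hlen : r.1.length + r.2.length = (s.drop (i.toNat + 1)).length := by
            rw [← List.length_append, hrdef]
            rw [pvTakeRun_append]
          rw [List.length_drop] at hlen
          omega)]
        rw [hrest, hx]
        rw [pvGo]
        simp [← hrdef]
      · rw [pvOuterB, dif_neg (by omega)]
        rw [List.drop_eq_nil_of_le (by omega)]
        simp [pvGo]

-- ===== VERDICT (by name: the statement is the Claim_ definition above) =====
theorem split_by_continuous_indices_spec : Claim_equal_split_by_continuous_indices := by
  intro indices _
  unfold Spec_split_by_continuous_indices split_by_continuous_indices split_by_continuous_indices_alt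
  have halt : ∀ s : List Int, pvOuterB s (s.length : Int) 0 [] = pvGo s := by
    intro s
    rw [outerB_spec s s.length 0 [] (by omega) (by omega)]
    simp
  by_cases hnil : indices = []
  · subst hnil
    simp [PySem.List.sorted, pvOuterB]
  · obtain ⟨h, t, hmatch⟩ : ∃ h t, PySem.List.sorted indices (fun x => x) false = h :: t := by
      cases hc : PySem.List.sorted indices (fun x => x) false with
      | nil =>
          exfalso
          have hp := PySem.List.sorted_perm (xs := indices) (key := fun x : Int => x) (rev := false)
          rw [hc] at hp
          exact hnil (List.Perm.nil_eq hp).symm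
      | cons a b => exact ⟨a, b, rfl⟩
    simp only [if_neg hnil, hmatch, halt]
    rw [foldl_eq_go2, go2_eq_go]
    simp [pvGo]
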